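-- pv_equiv track=rewrite | github.com/sonyaallin/eecs4401 | assignments/assignment-resources/more-resources/2023/Self-Assessments/Assignment2/barbuto3/funpuzz_csp.py | sat_cage_cons_tuples
-- ===== SOURCE A (Python) =====
-- import itertools
--
-- ADD=0
--
-- SUB=1
--
-- DIV=2
--
-- MUL=3
--
-- def apply_op(t1, t2, operation):
--     if operation==ADD: return t1+t2
--     elif operation==SUB: return t1-t2
--     elif operation==DIV: return t1/t2
--     elif operation==MUL: return t1*t2
--     return t1==t2
--
-- def sat_cage_cons_tuples(size, dim, operation, target):
--     res = []
--
--     # generate all permutations/configurations of tuples with specified size with possible range == dimenstion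
--     perms = list(itertools.permutations(range(1, dim+1), size))
--
--     # save perms that satisfy: i_1 op i_2 op ... op i_k == target
--     for p in perms:
--         t=p[0]
--         i=1
--         while i<size:
--             t = apply_op(t, p[i], operation)
--             i+=1
--         if t==target:
--             res.append(p)
--     return res
-- ===== SOURCE B (Python) =====
-- ADD = 0
-- SUB = 1
-- DIV = 2
-- MUL = 3
--
--
-- def apply_op(t1, t2, operation):
--     if operation == ADD: return t1 + t2
--     elif operation == SUB: return t1 - t2
--     elif operation == DIV: return t1 / t2
--     elif operation == MUL: return t1 * t2
--     return t1 == t2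
--
--
-- def sat_cage_cons_tuples(size, dim, operation, target):
--     # Recursive backtracking: build each permutation position by position,
--     # carrying the remaining candidates and the running folded accumulator,
--     # so the full permutation list is never materialized.
--     def go(avail, need, acc):
--         if need == 0:
--             return [()] if acc == target else []
--         if need > len(avail):
--             return []
--         out = []
--         for i, v in enumerate(avail):
--             nacc = v if acc is None else apply_op(acc, v, operation)
--             for rest in go(avail[:i] + avail[i + 1:], need - 1, nacc):
--                 out.append((v,) + rest)
--         return out
--
--     return go(list(range(1, dim + 1)), size, None)
-- ===== Notes on version B (the rewrite author's own statement) =====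
-- stated objective: alternative
-- what changed: B replaces materializing the full list of permutations and then re-folding each tuple by index with a recursive backtracking search that builds each permutation position by position while carrying the running folded accumulator, emitting a tuple only when the accumulator hits the target.
-- outside the precondition, e.g. on sat_cage_cons_tuples(2, 2, 2, 2): A returns [(2, 1)], B returns [(2, 1)]
import Mathlib
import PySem

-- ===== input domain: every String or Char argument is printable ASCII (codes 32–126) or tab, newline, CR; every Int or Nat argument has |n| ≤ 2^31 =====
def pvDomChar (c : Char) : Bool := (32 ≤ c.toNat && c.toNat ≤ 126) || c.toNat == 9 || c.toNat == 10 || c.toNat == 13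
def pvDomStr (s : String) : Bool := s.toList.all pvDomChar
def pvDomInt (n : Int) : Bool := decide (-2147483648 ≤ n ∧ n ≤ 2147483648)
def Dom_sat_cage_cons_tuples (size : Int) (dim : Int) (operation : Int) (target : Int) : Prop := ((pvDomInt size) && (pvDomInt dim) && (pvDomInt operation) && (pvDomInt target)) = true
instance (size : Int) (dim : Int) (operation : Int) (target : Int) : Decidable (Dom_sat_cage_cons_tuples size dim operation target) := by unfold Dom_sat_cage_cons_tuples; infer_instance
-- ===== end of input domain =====

-- B: recursive backtracking with a running accumulator instead of materializing all permutations and re-folding each by index (alternative decomposition, same cost).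


-- ===== PORT A =====
-- apply_op; for operation == 2 Python uses float division, which has no Int counterpart:
-- that branch is a placeholder and Pre_ excludes operation = 2 (exact on every other operation;
-- Python booleans compare/advance as 0/1, which the final branch models exactly).
def applyOp (t1 t2 operation : Int) : Int :=
  if operation = 0 then t1 + t2
  else if operation = 1 then t1 - t2
  else if operation = 2 then 0
  else if operation = 3 then t1 * t2
  else (if t1 = t2 then 1 else 0)

-- itertools.permutations(pool, r): for each element in order, prepend it to each
-- (r-1)-permutation of the rest (itertools' order for a duplicate-free pool).
def permsA (pool : List Int) (r : Int) : List (List Int) :=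
  if r ≤ 0 then [[]]
  else if (pool.length : Int) < r then []  -- itertools: empty when r exceeds the pool size
  else pool.flatMap (fun v => (permsA (pool.erase v) (r - 1)).map (v :: ·))
termination_by r.toNat
decreasing_by omega

def sat_cage_cons_tuples (size : Int) (dim : Int) (operation : Int) (target : Int) : List (List Int) :=
  let perms := permsA (PySem.List.pyRange 1 (dim + 1) 1) size
  perms.foldl (fun res p =>
    -- t = p[0] (IndexError when p = [], i.e. size = 0: excluded by Pre_)
    let t0 := p.headD 0
    -- while i < size: t = apply_op(t, p[i], operation)
    let t := (PySem.List.pyRange 1 size 1).foldl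
      (fun t i => applyOp t (PySem.List.pyGetD p i 0) operation) t0
    if t = target then res ++ [p] else res) []

-- ===== PORT B =====
-- backtracking: avail = remaining candidates, need = positions left, acc = running fold (none before
-- first pick); fuel = avail.length bounds the recursion depth (a pure totality device, never reached)
def goB (operation target : Int) (fuel : Nat) (avail : List Int) (need : Int) (acc : Option Int) : List (List Int) :=
  if need = 0 then
    (if (match acc with | some t => decide (t = target) | none => false) then [[]] else [])
  else if (avail.length : Int) < need then []  -- prune: fewer candidates left than positions
  else
    match fuel with
    | 0 => []
    | f + 1 =>
      avail.flatMap (fun v =>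
        (goB operation target f (avail.erase v) (need - 1)
            (some (match acc with | none => v | some t => applyOp t v operation))).map (v :: ·))

def sat_cage_cons_tuples_alt (size : Int) (dim : Int) (operation : Int) (target : Int) : List (List Int) :=
  let avail := PySem.List.pyRange 1 (dim + 1) 1
  goB operation target avail.length avail size none

-- ===== PRECONDITION & SPEC =====
-- Pre_ excludes size ≤ 0, where A raises (IndexError at size = 0, ValueError below), and
-- operation = 2 (DIV), where A folds with Python float division, which is outside the Int
-- port convention (Python B matches A there; only the Lean claim must exclude it).
def Pre_sat_cage_cons_tuples (size : Int) (dim : Int) (operation : Int) (target : Int) : Prop :=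
  1 ≤ size ∧ operation ≠ 2
instance (size : Int) (dim : Int) (operation : Int) (target : Int) : Decidable (Pre_sat_cage_cons_tuples size dim operation target) := by unfold Pre_sat_cage_cons_tuples; infer_instance

def pvWitness_sat_cage_cons_tuples : Int × Int × Int × Int := (2, 2, 0, 3)

def Spec_sat_cage_cons_tuples (size : Int) (dim : Int) (operation : Int) (target : Int) (out : List (List Int)) : Prop := out = sat_cage_cons_tuples_alt size dim operation target
instance (size : Int) (dim : Int) (operation : Int) (target : Int) (out : List (List Int)) : Decidable (Spec_sat_cage_cons_tuples size dim operation target out) := by unfold Spec_sat_cage_cons_tuples; infer_instance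

-- ===== CLAIM (what is proved, stated in full; the proofs are below) =====
def Claim_equal_sat_cage_cons_tuples : Prop := ∀ (size : Int) (dim : Int) (operation : Int) (target : Int), Dom_sat_cage_cons_tuples size dim operation target → Pre_sat_cage_cons_tuples size dim operation target → Spec_sat_cage_cons_tuples size dim operation target (sat_cage_cons_tuples size dim operation target)


-- ===== LEMMAS AND PROOFS =====

-- the accumulator step B performs at each position
def stepB (operation : Int) (acc : Option Int) (v : Int) : Option Int :=
  some (match acc with | none => v | some t => applyOp t v operation)

-- the success test on a final accumulator
def hitB (target : Int) (acc : Option Int) : Bool :=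
  match acc with | some t => decide (t = target) | none => false

-- every member of permsA pool n has length n
theorem permsA_length (pool : List Int) (n : Nat) (p : List Int)
    (hp : p ∈ permsA pool (n : Int)) : p.length = n := by
  induction n generalizing pool p with
  | zero => rw [permsA.eq_def] at hp; simp at hp; simp [hp]
  | succ k ih =>
    rw [permsA.eq_def] at hp
    rw [if_neg (by omega : ¬((k + 1 : Nat) : Int) ≤ 0)] at hp
    by_cases hlen : (pool.length : Int) < ((k + 1 : Nat) : Int)
    · rw [if_pos hlen] at hp; simp at hp
    rw [if_neg hlen] at hp
    simp only [List.mem_flatMap, List.mem_map] at hp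
    obtain ⟨v, _, q, hq, rfl⟩ := hp
    rw [show ((k + 1 : Nat) : Int) - 1 = (k : Int) by push_cast; ring] at hq
    simp [ih _ _ hq]

-- main invariant: backtracking = filter over the permutation tree with the fold carried along
theorem goB_eq_filter (operation target : Int) (n : Nat) :
    ∀ (fuel : Nat) (pool : List Int) (acc : Option Int), pool.length ≤ fuel →
    goB operation target fuel pool (n : Int) acc
      = (permsA pool (n : Int)).filter (fun p => hitB target (p.foldl (stepB operation) acc)) := by
  induction n with
  | zero =>
    intro fuel pool acc _
    rw [goB.eq_def, permsA.eq_def]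
    simp only [Nat.cast_zero]
    cases acc with
    | none => simp [hitB, List.filter]
    | some t => by_cases h : t = target <;> simp [hitB, List.filter, h]
  | succ k ih =>
    intro fuel pool acc hf
    rw [goB.eq_def, permsA.eq_def]
    rw [if_neg (by omega : ¬((k + 1 : Nat) : Int) = 0), if_neg (by omega : ¬((k + 1 : Nat) : Int) ≤ 0)]
    by_cases hlen : (pool.length : Int) < ((k + 1 : Nat) : Int)
    · rw [if_pos hlen, if_pos hlen]; simp
    rw [if_neg hlen, if_neg hlen]
    cases fuel with
    | zero =>
      exfalso
      have : pool.length = 0 := by omega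
      omega
    | succ f =>
      rw [List.filter_flatMap]
      refine List.flatMap_congr (fun v hv => ?_)
      rw [show ((k + 1 : Nat) : Int) - 1 = (k : Int) by push_cast; ring]
      rw [ih f (pool.erase v) _ (by have := List.length_erase_of_mem hv; omega)]
      rw [List.filter_map]
      rfl

-- A's per-tuple index fold equals the structural fold over the tail
theorem idx_fold_eq (operation : Int) (p : List Int) :
    (PySem.List.pyRange 1 ((p.length : Nat) : Int) 1).foldl
        (fun t i => applyOp t (PySem.List.pyGetD p i 0) operation) (p.headD 0)
      = (p.drop 1).foldl (fun t v => applyOp t v operation) (p.headD 0) := by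
  have := PySem.List.foldl_pyRange_pyGetD' p 0 (fun t v => applyOp t v operation) (p.headD 0)
    (a := 1) (by omega)
  simpa using this

-- for nonempty p, the carried-accumulator fold from none matches A's head-then-tail fold
theorem fold_none_eq (operation target : Int) (x : Int) (xs : List Int) :
    hitB target ((x :: xs).foldl (stepB operation) none)
      = decide ((xs.foldl (fun t v => applyOp t v operation) x) = target) := by
  have h : ∀ (ys : List Int) (t : Int),
      ys.foldl (stepB operation) (some t) = some (ys.foldl (fun a v => applyOp a v operation) t) := by
    intro ys
    induction ys with
    | nil => intro t; rfl
    | cons y ys ih => intro t; simp [List.foldl_cons, stepB, ih]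
  simp [List.foldl_cons, stepB, h, hitB]

-- ===== VERDICT (by name: the statement is the Claim_ definition above) =====
theorem sat_cage_cons_tuples_spec : Claim_equal_sat_cage_cons_tuples := by
  intro size dim operation target _ hpre
  obtain ⟨hsz, _⟩ := hpre
  unfold Spec_sat_cage_cons_tuples sat_cage_cons_tuples sat_cage_cons_tuples_alt
  obtain ⟨n, rfl⟩ : ∃ n : Nat, size = (n : Int) := ⟨size.toNat, by omega⟩
  dsimp only
  rw [goB_eq_filter operation target n _ _ none le_rfl]
  rw [PySem.List.foldl_append_ite_eq_filter
    (fun p => (PySem.List.pyRange 1 (n : Int) 1).foldl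
      (fun t i => applyOp t (PySem.List.pyGetD p i 0) operation) (p.headD 0) = target)]
  simp only [List.nil_append]
  refine (List.filter_congr (fun p hp => ?_)).symm
  have hlen := permsA_length _ n p hp
  cases p with
  | nil => exfalso; simp at hlen; omega
  | cons x xs =>
    rw [show (n : Int) = (((x :: xs).length : Nat) : Int) by rw [hlen]]
    rw [idx_fold_eq operation (x :: xs), fold_none_eq]
    rfl
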